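-- pv_equiv track=rewrite | github.com/elveskevtar/AdventOfCode | 2022/solution1.py | most_calories
-- ===== SOURCE A (Python) =====
-- def most_calories(data):
--     max_calories = 0
--     current_calories = 0
--     for i in data:
--         if i == "":
--             max_calories = max(max_calories, current_calories)
--             current_calories = 0
--             continue
--         current_calories += int(i)
--     return max(max_calories, current_calories)
-- ===== SOURCE B (Python) =====
-- def most_calories(data):
--     groups = []
--     cur = []
--     for x in data:
--         if x == "":
--             groups.append(cur)
--             cur = []
--         else:
--             cur.append(x)
--     groups.append(cur)
--     sums = [sum(int(x) for x in group) for group in groups]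
--     return max([0] + sums)
-- ===== Notes on version B (the rewrite author's own statement) =====
-- stated objective: simpler
-- what changed: B splits the input into blank-line-separated groups first, then maps each group to its sum and takes max([0]+sums) in separate passes, instead of A's single fused loop carrying a running max and running sum.
import Mathlib
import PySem

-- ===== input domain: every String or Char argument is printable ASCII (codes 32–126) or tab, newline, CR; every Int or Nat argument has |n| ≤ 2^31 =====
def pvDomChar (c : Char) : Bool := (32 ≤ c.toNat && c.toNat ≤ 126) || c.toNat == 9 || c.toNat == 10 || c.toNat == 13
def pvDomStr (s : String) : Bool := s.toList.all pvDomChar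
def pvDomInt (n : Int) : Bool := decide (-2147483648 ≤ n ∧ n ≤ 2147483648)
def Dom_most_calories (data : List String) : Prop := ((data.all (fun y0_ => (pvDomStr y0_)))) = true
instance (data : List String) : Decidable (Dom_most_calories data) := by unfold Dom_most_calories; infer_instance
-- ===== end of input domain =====

-- B splits the input into blank-separated groups first, then sums each group and takes
-- max([0] + sums) in separate passes, instead of A's single fused running-max/running-sum loop.

-- ===== PORT A =====
-- A's fused loop: state (max_calories, current_calories)
def mcLoop : List String → Int → Int → Int
  | [], m, c => max m c
  | i :: t, m, c =>
    if i = "" then mcLoop t (max m c) 0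
    else mcLoop t m (c + (PySem.Int.ofStr? i).getD 0)

def most_calories (data : List String) : Int := mcLoop data 0 0

-- ===== PORT B =====
-- manual split at "" separators (always appends the trailing group)
def mcSplit : List String → List String → List (List String)
  | [], cur => [cur]
  | x :: t, cur => if x = "" then cur :: mcSplit t [] else mcSplit t (cur ++ [x])

def mcSum (g : List String) : Int := g.foldl (fun a x => a + (PySem.Int.ofStr? x).getD 0) 0

def most_calories_alt (data : List String) : Int :=
  ((mcSplit data []).map mcSum).foldl max 0

-- ===== PRECONDITION & SPEC =====
-- Pre_ excludes exactly the inputs where int(i) raises ValueError in A: every non-empty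
-- entry must be a Python int literal (optional whitespace, optional sign, digits with
-- single underscores between digits).
def pvDigitsTail : List Char → Bool
  | [] => true
  | '_' :: c :: cs => c.isDigit && pvDigitsTail cs
  | ['_'] => false
  | c :: cs => c.isDigit && pvDigitsTail cs

def pvIntLike (s : String) : Bool :=
  let t := (((s.toList.dropWhile Char.isWhitespace).reverse.dropWhile Char.isWhitespace).reverse)
  let t := match t with
    | '+' :: cs => cs
    | '-' :: cs => cs
    | cs => cs
  match t with
  | [] => false
  | c :: cs => c.isDigit && pvDigitsTail cs

def Pre_most_calories (data : List String) : Prop :=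
  ∀ s ∈ data, s ≠ "" → pvIntLike s = true
instance (data : List String) : Decidable (Pre_most_calories data) := by
  unfold Pre_most_calories; infer_instance

def pvWitness_most_calories : List String := ["1", "2", "", "3"]

def Spec_most_calories (data : List String) (out : Int) : Prop := out = most_calories_alt data
instance (data : List String) (out : Int) : Decidable (Spec_most_calories data out) := by
  unfold Spec_most_calories; infer_instance

-- ===== CLAIM =====
def Claim_equal_most_calories : Prop :=
  ∀ (data : List String), Dom_most_calories data → Pre_most_calories data →
    Spec_most_calories data (most_calories data)

-- ===== LEMMAS AND PROOFS =====
theorem mcSum_append (g : List String) (x : String) :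
    mcSum (g ++ [x]) = mcSum g + (PySem.Int.ofStr? x).getD 0 := by
  simp [mcSum, List.foldl_append]

theorem mcLoop_eq_split (t : List String) (cur : List String) (m : Int) :
    mcLoop t m (mcSum cur) = ((mcSplit t cur).map mcSum).foldl max m := by
  induction t generalizing cur m with
  | nil => simp [mcLoop, mcSplit]
  | cons x t ih =>
    by_cases hx : x = ""
    · subst hx
      have h0 : (0 : Int) = mcSum [] := by simp [mcSum]
      simp only [mcLoop, mcSplit, if_true, List.map_cons, List.foldl_cons]
      rw [h0, ih]
    · simp only [mcLoop, mcSplit, if_neg hx]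
      rw [← mcSum_append, ih]

-- ===== VERDICT =====
theorem most_calories_spec : Claim_equal_most_calories := by
  intro data _ _
  unfold Spec_most_calories most_calories most_calories_alt
  have h := mcLoop_eq_split data [] 0
  simpa [mcSum] using h
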